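-- pv_equiv track=rewrite | github.com/WeirdInnit/Game-Leader-Speedrun-Any- | denaryToBCD.py | convert
-- ===== SOURCE A (Python) =====
-- def convert(denaryValue):
--     binary = ""
--     binaryValues = [8,4,2,1]
--
--     for digit in denaryValue:
--         digit = int(digit)
--
--         for value in binaryValues:
--             if digit - value < 0:
--                 binary += '0'
--             else:
--                 binary += '1'
--                 digit -= value
--
--     return binary
-- ===== SOURCE B (Python) =====
-- def convert(denaryValue):
--     return ''.join(format(int(d), '04b') for d in denaryValue)
-- ===== Notes on version B (the rewrite author's own statement) =====
-- stated objective: idiomatic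
-- what changed: Replaces the per-digit greedy 8/4/2/1 subtraction loop with a direct 4-bit binary conversion of each digit via the format builtin, joined in one pass.
import Mathlib
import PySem

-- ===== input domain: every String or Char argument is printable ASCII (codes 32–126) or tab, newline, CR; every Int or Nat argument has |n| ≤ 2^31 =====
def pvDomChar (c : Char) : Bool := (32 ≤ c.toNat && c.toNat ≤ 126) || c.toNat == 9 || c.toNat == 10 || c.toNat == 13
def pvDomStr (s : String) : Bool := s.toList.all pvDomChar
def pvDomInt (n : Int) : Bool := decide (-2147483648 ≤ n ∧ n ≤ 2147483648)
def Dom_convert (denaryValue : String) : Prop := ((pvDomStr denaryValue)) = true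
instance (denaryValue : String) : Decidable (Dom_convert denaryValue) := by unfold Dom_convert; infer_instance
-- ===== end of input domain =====

-- B replaces A's greedy 8/4/2/1 subtraction loop by a direct 4-bit binary conversion of each digit (idiomatic; same cost).

-- ===== PORT A =====
-- inner loop body: for value in [8,4,2,1]: append bit, maybe subtract
def convertStep (st : String × Int) (value : Int) : String × Int :=
  if st.2 - value < 0 then (st.1 ++ "0", st.2)
  else (st.1 ++ "1", st.2 - value)

def convert (denaryValue : String) : String :=
  (denaryValue.toList.foldl
    (fun binary c =>
      (([8, 4, 2, 1] : List Int).foldl convertStep (binary, (c.toNat : Int) - 48)).1)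
    "")

-- ===== PORT B =====
-- format(int(d), '04b') for a single decimal digit: four bits, most significant first
def nibble (d : Int) : String :=
  (if PySem.Int.mod (PySem.Int.floordiv d 8) 2 = 0 then "0" else "1") ++
  (if PySem.Int.mod (PySem.Int.floordiv d 4) 2 = 0 then "0" else "1") ++
  (if PySem.Int.mod (PySem.Int.floordiv d 2) 2 = 0 then "0" else "1") ++
  (if PySem.Int.mod d 2 = 0 then "0" else "1")

-- ''.join(...) : fold string concatenation over the mapped nibbles
def pyJoin (l : List String) : String := l.foldl (· ++ ·) ""

def convert_alt (denaryValue : String) : String :=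
  pyJoin (denaryValue.toList.map (fun c => nibble ((c.toNat : Int) - 48)))

-- ===== PRECONDITION & SPEC =====
-- Pre_ excludes exactly the strings containing a non-digit character, on which A's int(digit) raises ValueError.
def Pre_convert (denaryValue : String) : Prop :=
  (denaryValue.toList.all (fun c => 48 ≤ c.toNat && c.toNat ≤ 57)) = true
instance (denaryValue : String) : Decidable (Pre_convert denaryValue) := by unfold Pre_convert; infer_instance

def pvWitness_convert : String := "907"

def Spec_convert (denaryValue : String) (out : String) : Prop := out = convert_alt denaryValue
instance (denaryValue : String) (out : String) : Decidable (Spec_convert denaryValue out) := by unfold Spec_convert; infer_instance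

-- ===== CLAIM =====
def Claim_equal_convert : Prop := ∀ (denaryValue : String), Dom_convert denaryValue → Pre_convert denaryValue → Spec_convert denaryValue (convert denaryValue)

-- ===== LEMMAS AND PROOFS =====

theorem foldl_append_shift (l : List String) (bin : String) :
    l.foldl (· ++ ·) bin = bin ++ l.foldl (· ++ ·) "" := by
  induction l generalizing bin with
  | nil => simp
  | cons a l ih =>
    simp only [List.foldl_cons]
    rw [ih (bin ++ a), ih ("" ++ a)]
    simp [String.append_assoc]

theorem pyJoin_cons (a : String) (l : List String) :
    pyJoin (a :: l) = a ++ pyJoin l := by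
  unfold pyJoin
  simp only [List.foldl_cons]
  rw [foldl_append_shift l ("" ++ a)]
  simp

-- the inner fold only appends to the accumulator string
theorem convertStep_fold_append (vs : List Int) (bin : String) (d : Int) :
    (vs.foldl convertStep (bin, d)) =
      (bin ++ (vs.foldl convertStep ("", d)).1, (vs.foldl convertStep ("", d)).2) := by
  induction vs generalizing bin d with
  | nil => simp
  | cons v vs ih =>
    simp only [List.foldl_cons, convertStep]
    split_ifs with h
    · rw [ih (bin ++ "0"), ih ("" ++ "0")]
      simp [String.append_assoc]
    · rw [ih (bin ++ "1"), ih ("" ++ "1")]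
      simp [String.append_assoc]

-- on a single decimal digit, A's greedy subtraction produces exactly B's nibble
theorem inner_eq_nibble (d : Int) (h0 : 0 ≤ d) (h9 : d ≤ 9) :
    (([8, 4, 2, 1] : List Int).foldl convertStep ("", d)).1 = nibble d := by
  interval_cases d <;> decide

theorem fold_eq_join (l : List Char) (bin : String)
    (h : ∀ c ∈ l, 48 ≤ c.toNat ∧ c.toNat ≤ 57) :
    (l.foldl (fun binary c =>
        (([8, 4, 2, 1] : List Int).foldl convertStep (binary, (c.toNat : Int) - 48)).1) bin)
    = bin ++ pyJoin (l.map (fun c => nibble ((c.toNat : Int) - 48))) := by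
  induction l generalizing bin with
  | nil => simp [pyJoin]
  | cons c l ih =>
    have hc := h c (List.mem_cons_self ..)
    rw [List.foldl_cons, List.map_cons, pyJoin_cons]
    have hacc : (([8, 4, 2, 1] : List Int).foldl convertStep (bin, (c.toNat : Int) - 48)).1
        = bin ++ nibble ((c.toNat : Int) - 48) := by
      rw [convertStep_fold_append, inner_eq_nibble ((c.toNat : Int) - 48) (by omega) (by omega)]
    rw [hacc, ih _ (fun x hx => h x (List.mem_cons_of_mem _ hx))]
    simp [String.append_assoc]

-- ===== VERDICT =====
theorem convert_spec : Claim_equal_convert := by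
  intro s _ hpre
  unfold Pre_convert at hpre
  simp only [List.all_eq_true, Bool.and_eq_true, decide_eq_true_eq] at hpre
  unfold Spec_convert convert convert_alt
  exact fold_eq_join s.toList "" hpre
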